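-- pv_equiv track=rewrite | github.com/Ruptamluk/Astro-project | backend/utils.py | calculate_strength_number
-- ===== SOURCE A (Python) =====
-- def reduce_to_single_digit(num: int) -> int:
--     """Reduce a number to single digit by adding its digits"""
--     while num >= 10:
--         num = sum(int(digit) for digit in str(num))
--     return num
--
-- def calculate_strength_number(dob: str, driver_number: int) -> int:
--     try:
--         parts = dob.split('-')
--         month = parts[1]
--         month_digit_sum = sum(int(digit) for digit in month)
--         return reduce_to_single_digit(driver_number + month_digit_sum)
--     except:
--         return 1
-- ===== SOURCE B (Python) =====
-- def calculate_strength_number(dob: str, driver_number: int) -> int: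
--     try:
--         month = dob.split('-')[1]
--         n = driver_number + sum(int(digit) for digit in month)
--         # closed-form digital root replaces the iterative reduction loop
--         return n if n < 10 else 1 + (n - 1) % 9
--     except:
--         return 1
-- ===== Notes on version B (the rewrite author's own statement) =====
-- stated objective: simpler
-- what changed: The iterative digit-reduction loop (repeatedly stringify the number and re-sum its digits) is replaced by the closed-form digital root 1 + (n - 1) % 9, guarded by n < 10 so values the loop never touches pass through unchanged.
import Mathlib
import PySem

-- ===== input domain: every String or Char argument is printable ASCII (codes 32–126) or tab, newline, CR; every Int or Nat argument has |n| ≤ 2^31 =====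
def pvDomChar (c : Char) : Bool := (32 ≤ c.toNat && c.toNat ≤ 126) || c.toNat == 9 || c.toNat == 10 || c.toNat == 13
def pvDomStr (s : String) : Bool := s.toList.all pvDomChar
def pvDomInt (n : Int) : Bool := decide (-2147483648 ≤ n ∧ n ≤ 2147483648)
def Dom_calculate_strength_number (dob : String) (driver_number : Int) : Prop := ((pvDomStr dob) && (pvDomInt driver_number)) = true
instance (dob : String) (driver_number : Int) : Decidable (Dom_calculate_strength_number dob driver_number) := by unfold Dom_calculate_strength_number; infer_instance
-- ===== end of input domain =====

-- B replaces A's iterative digit-reduction loop by the closed-form digital root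
-- 1 + (n - 1) % 9 (guarded by n < 10); objective: simpler.

-- ===== PORT A =====
-- shared helper: Python's `sum(int(digit) for digit in s)`; none = ValueError on a non-digit char
def pvSumIntChars? : List Char → Option Int
  | [] => some 0
  | c :: cs =>
    match PySem.Int.ofChars? [c], pvSumIntChars? cs with
    | some v, some r => some (v + r)
    | _, _ => none

-- lemmas the port's termination proof cites (digit sum of the decimal string of num)
lemma pv_ofChars_digitChar (d : Nat) (hd : d < 10) :
    PySem.Int.ofChars? [Nat.digitChar d] = some (d : Int) := by
  interval_cases d <;> decide

lemma pv_core (fuel : Nat) : ∀ (n : Nat) (ds : List Char), n < fuel →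
    pvSumIntChars? (Nat.toDigitsCore 10 fuel n ds)
      = (pvSumIntChars? ds).map (fun r => ((Nat.digits 10 n).sum : Int) + r) := by
  induction fuel with
  | zero => intro n ds h; omega
  | succ fuel ih =>
    intro n ds h
    simp only [Nat.toDigitsCore]
    by_cases h0 : n / 10 = 0
    · rw [if_pos h0]
      have hd : n < 10 := Nat.lt_of_div_eq_zero (by norm_num) h0
      have hsum : (Nat.digits 10 n).sum = n := by
        rcases Nat.eq_zero_or_pos n with rfl | hn
        · simp
        · rw [Nat.digits_def' (by norm_num : (1:Nat) < 10) hn, h0]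
          simp [Nat.mod_eq_of_lt hd]
      simp only [pvSumIntChars?, pv_ofChars_digitChar (n % 10) (Nat.mod_lt _ (by norm_num))]
      rw [hsum]
      cases pvSumIntChars? ds <;> simp [Nat.mod_eq_of_lt hd]
    · rw [if_neg h0]
      have hn : 0 < n := Nat.pos_of_ne_zero (fun e => h0 (by subst e; rfl))
      have hdiv : n / 10 < n := Nat.div_lt_self hn (by norm_num)
      rw [ih (n / 10) _ (by omega)]
      simp only [pvSumIntChars?, pv_ofChars_digitChar (n % 10) (Nat.mod_lt _ (by norm_num))]
      rw [Nat.digits_def' (by norm_num : (1:Nat) < 10) hn]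
      cases pvSumIntChars? ds
      · simp
      · simp
        ring

lemma pv_sum_toChars (n : Int) (h : 0 ≤ n) :
    pvSumIntChars? (PySem.Int.toChars n) = some ((Nat.digits 10 n.toNat).sum : Int) := by
  have : PySem.Int.toChars n = Nat.toDigitsCore 10 (n.toNat + 1) n.toNat [] := by
    simp [PySem.Int.toChars, not_lt.mpr h, Nat.toDigits]
  rw [this, pv_core (n.toNat + 1) n.toNat [] (by omega)]
  simp [pvSumIntChars?]

lemma pv_dsum_lt (m : Nat) (h : 10 ≤ m) : (Nat.digits 10 m).sum < m := by
  rw [Nat.digits_def' (by norm_num : (1:Nat) < 10) (by omega)]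
  have h1 := Nat.digit_sum_le 10 (m / 10)
  have h2 := Nat.div_add_mod m 10
  simp only [List.sum_cons]
  omega

-- Python's reduce_to_single_digit; Option result: none = an exception inside the loop body
def pv_reduce? (num : Int) : Option Int :=
  if _h : 10 ≤ num then
    match hs : pvSumIntChars? (PySem.Int.toChars num) with
    | none => none
    | some s => pv_reduce? s
  else some num
termination_by num.toNat
decreasing_by
  rw [pv_sum_toChars num (by omega)] at hs
  injection hs with hs
  have hlt := pv_dsum_lt num.toNat (by omega)
  omega

def calculate_strength_number (dob : String) (driver_number : Int) : Int :=
  match PySem.Str.split? dob "-" with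
  | none => 1  -- unreachable: separator "-" is non-empty
  | some parts =>
    match PySem.List.pyGet? parts 1 with
    | none => 1  -- IndexError → except: return 1
    | some month =>
      match pvSumIntChars? month.toList with
      | none => 1  -- ValueError → except: return 1
      | some month_digit_sum =>
        match pv_reduce? (driver_number + month_digit_sum) with
        | none => 1
        | some r => r

-- ===== PORT B =====
def calculate_strength_number_alt (dob : String) (driver_number : Int) : Int :=
  match PySem.Str.split? dob "-" with
  | none => 1
  | some parts =>
    match PySem.List.pyGet? parts 1 with
    | none => 1
    | some month =>
      match pvSumIntChars? month.toList with
      | none => 1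
      | some month_digit_sum =>
        let n := driver_number + month_digit_sum
        if n < 10 then n else 1 + PySem.Int.mod (n - 1) 9

-- ===== PRECONDITION & SPEC =====
def Spec_calculate_strength_number (dob : String) (driver_number : Int) (out : Int) : Prop := out = calculate_strength_number_alt dob driver_number
instance (dob : String) (driver_number : Int) (out : Int) : Decidable (Spec_calculate_strength_number dob driver_number out) := by unfold Spec_calculate_strength_number; infer_instance

-- ===== CLAIM (what is proved, stated in full; the proofs are below) =====
def Claim_equal_calculate_strength_number : Prop := ∀ (dob : String) (driver_number : Int), Dom_calculate_strength_number dob driver_number → Spec_calculate_strength_number dob driver_number (calculate_strength_number dob driver_number)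

-- ===== LEMMAS AND PROOFS =====
lemma pv_dsum_pos (m : Nat) (hm : m ≠ 0) : 1 ≤ (Nat.digits 10 m).sum := by
  induction m using Nat.strong_induction_on with
  | _ m ih =>
    rw [Nat.digits_def' (by norm_num : (1:Nat) < 10) (Nat.pos_of_ne_zero hm)]
    simp only [List.sum_cons]
    by_cases h0 : m % 10 = 0
    · have h2 := Nat.div_add_mod m 10
      have hd : m / 10 ≠ 0 := by omega
      have := ih (m / 10) (Nat.div_lt_self (Nat.pos_of_ne_zero hm) (by norm_num)) hd
      omega
    · omega

lemma pv_reduce_aux : ∀ (k : Nat) (num : Int), num.toNat ≤ k →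
    pv_reduce? num = some (if num < 10 then num else 1 + PySem.Int.mod (num - 1) 9) := by
  intro k
  induction k with
  | zero =>
    intro num h
    rw [pv_reduce?, dif_neg (by omega), if_pos (by omega)]
  | succ k ih =>
    intro num h
    by_cases h10 : 10 ≤ num
    · rw [pv_reduce?, dif_pos h10]
      split
      · next heq =>
        rw [pv_sum_toChars num (by omega)] at heq
        cases heq
      · next s heq =>
        rw [pv_sum_toChars num (by omega)] at heq
        injection heq with heq
        have hlt := pv_dsum_lt num.toNat (by omega)
        have hpos := pv_dsum_pos num.toNat (by omega)
        have hmod : num.toNat % 9 = (Nat.digits 10 num.toNat).sum % 9 :=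
          Nat.modEq_nine_digits_sum num.toNat
        have hnum : (num.toNat : Int) = num := by omega
        rw [ih s (by omega), if_neg (not_lt.mpr h10)]
        rw [PySem.Int.mod_eq_emod_of_pos (a := num - 1) (by norm_num)]
        simp only [Option.some.injEq]
        by_cases hs10 : s < 10
        · rw [if_pos hs10]
          omega
        · rw [if_neg hs10, PySem.Int.mod_eq_emod_of_pos (a := s - 1) (by norm_num)]
          omega
    · rw [pv_reduce?, dif_neg h10, if_pos (by omega)]

lemma pv_reduce_closed (num : Int) :
    pv_reduce? num = some (if num < 10 then num else 1 + PySem.Int.mod (num - 1) 9) :=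
  pv_reduce_aux num.toNat num le_rfl

-- ===== VERDICT (by name: the statement is the Claim_ definition above) =====
theorem calculate_strength_number_spec : Claim_equal_calculate_strength_number := by
  intro dob driver_number _
  unfold Spec_calculate_strength_number calculate_strength_number calculate_strength_number_alt
  rcases hsp : PySem.Str.split? dob "-" with _ | parts <;> simp only
  rcases hg : PySem.List.pyGet? parts 1 with _ | month <;> simp only
  rcases hsum : pvSumIntChars? month.toList with _ | msum <;> simp only
  simp [pv_reduce_closed]
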